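-- pv_equiv track=rewrite | github.com/pthom/fiatlight | src/python/fiatlight/fiat_runner/fiat_shot_snippet.py | _split_md_around_snippets
-- ===== SOURCE A (Python) =====
-- MdLine = str
--
-- MdLines = list[str]
--
-- _TOKEN_SNIPPET = "*Visual example: "
--
-- def _is_snippet_start(line: str) -> bool:
--     return line.startswith(_TOKEN_SNIPPET)
--
-- def _split_md_around_snippets(file_lines: MdLines) -> list[MdLines]:
--     parts: list[MdLines] = []
--     current_part: list[MdLine] = []
--     for line in file_lines:
--         if _is_snippet_start(line):
--             if current_part:
--                 parts.append(current_part)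
--             current_part = [line]
--         else:
--             current_part.append(line)
--     parts.append(current_part)
--     return parts
-- ===== SOURCE B (Python) =====
-- _TOKEN_SNIPPET = "*Visual example: "
--
--
-- def _is_snippet_start(line: str) -> bool:
--     return line.startswith(_TOKEN_SNIPPET)
--
--
-- def _split_md_around_snippets(file_lines):
--     # Two-phase: find the marker positions, then slice the lines at those
--     # boundaries (0 is always a boundary; the end of the list closes the last part).
--     starts = [i for i, line in enumerate(file_lines) if _is_snippet_start(line)]
--     bounds = sorted(set([0] + starts)) + [len(file_lines)]
--     return [file_lines[a:b] for a, b in zip(bounds, bounds[1:])]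
-- ===== Notes on version B (the rewrite author's own statement) =====
-- stated objective: alternative
-- what changed: Replaces A's streaming accumulator (an open current part flushed at each marker) by a two-phase index-table pass: collect the marker positions, then slice the line list at those boundaries.
import Mathlib
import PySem

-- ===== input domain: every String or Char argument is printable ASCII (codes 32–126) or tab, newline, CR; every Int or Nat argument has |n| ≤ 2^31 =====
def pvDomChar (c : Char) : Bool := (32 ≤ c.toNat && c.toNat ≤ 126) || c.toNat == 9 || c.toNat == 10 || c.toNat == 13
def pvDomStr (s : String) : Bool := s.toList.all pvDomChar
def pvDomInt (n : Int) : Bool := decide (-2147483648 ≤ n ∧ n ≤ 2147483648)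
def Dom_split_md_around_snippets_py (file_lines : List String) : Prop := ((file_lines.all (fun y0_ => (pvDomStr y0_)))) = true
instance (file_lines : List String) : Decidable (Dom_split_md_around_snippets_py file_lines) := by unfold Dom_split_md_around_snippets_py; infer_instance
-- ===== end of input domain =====

-- B replaces A's streaming accumulator by a two-phase pass: collect the marker
-- positions, then slice the line list at those boundaries (alternative decomposition).

-- ===== PORT A =====
def is_snippet_start (line : String) : Bool := PySem.Str.startswith line "*Visual example: "

-- A's loop body: push current part on a marker, else extend it
def stepA (s : List (List String) × List String) (line : String) : List (List String) × List String :=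
  if is_snippet_start line then
    ((if s.2.isEmpty then s.1 else s.1 ++ [s.2]), [line])
  else
    (s.1, s.2 ++ [line])

def split_md_around_snippets_py (file_lines : List String) : List (List String) :=
  let st := file_lines.foldl stepA ([], [])
  st.1 ++ [st.2]

-- ===== PORT B =====
def split_md_around_snippets_py_alt (file_lines : List String) : List (List String) :=
  let starts := ((PySem.List.enumerate file_lines).filter (fun p => is_snippet_start p.2)).map (fun p => p.1)
  let bounds := PySem.List.sorted (PySem.Set.ofList ((0 : Int) :: starts)) (fun x => x) false ++ [(file_lines.length : Int)]
  (bounds.zip bounds.tail).map (fun p => PySem.List.slice file_lines (some p.1) (some p.2))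

-- ===== PRECONDITION & SPEC =====
def Spec_split_md_around_snippets_py (file_lines : List String) (out : List (List String)) : Prop := out = split_md_around_snippets_py_alt file_lines
instance (file_lines : List String) (out : List (List String)) : Decidable (Spec_split_md_around_snippets_py file_lines out) := by unfold Spec_split_md_around_snippets_py; infer_instance

-- ===== CLAIM (what is proved, stated in full; the proofs are below) =====
def Claim_equal_split_md_around_snippets_py : Prop := ∀ (file_lines : List String), Dom_split_md_around_snippets_py file_lines → Spec_split_md_around_snippets_py file_lines (split_md_around_snippets_py file_lines)

-- ===== LEMMAS AND PROOFS =====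

-- common recursive characterisation: always a (possibly empty) leading segment
def splitS : List String → List (List String)
  | [] => [[]]
  | x :: xs =>
    match splitS xs with
    | [] => []
    | p :: ps => if is_snippet_start x then [] :: (x :: p) :: ps else (x :: p) :: ps

-- A's continuation semantics
def gA : List String → List String → List (List String)
  | [], cur => [cur]
  | x :: xs, cur =>
    if is_snippet_start x then
      (if cur.isEmpty then gA xs [x] else cur :: gA xs [x])
    else gA xs (cur ++ [x])

-- marker indices of xs, enumerated from s
def cutsFrom (s : Int) (xs : List String) : List Int :=
  ((PySem.List.enumerate xs s).filter (fun p => is_snippet_start p.2)).map (fun p => p.1)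

-- consecutive-pair slices of xs at boundary list bs
def pairSlices (xs : List String) (bs : List Int) : List (List String) :=
  (bs.zip bs.tail).map (fun p => PySem.List.slice xs (some p.1) (some p.2))

-- slices of xs at interior cut points cs (0 and xs.length are always boundaries)
def chop0 (xs : List String) (cs : List Int) : List (List String) :=
  pairSlices xs ((0 : Int) :: cs ++ [(xs.length : Int)])

lemma splitS_ne_nil (xs : List String) : splitS xs ≠ [] := by
  induction xs with
  | nil => simp [splitS]
  | cons x xs ih =>
    cases h : splitS xs with
    | nil => exact absurd h ih
    | cons p ps =>
      simp only [splitS, h]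
      split <;> simp

lemma foldlA_eq_gA (xs : List String) (parts : List (List String)) (cur : List String) :
    (xs.foldl stepA (parts, cur)).1 ++ [(xs.foldl stepA (parts, cur)).2] =
      parts ++ gA xs cur := by
  induction xs generalizing parts cur with
  | nil => simp [gA]
  | cons x xs ih =>
    rw [List.foldl_cons]
    by_cases h : is_snippet_start x
    · by_cases hc : cur.isEmpty
      · rw [show stepA (parts, cur) x = (parts, [x]) by simp [stepA, h, hc]]
        rw [ih, gA]
        simp [h, hc]
      · rw [show stepA (parts, cur) x = (parts ++ [cur], [x]) by
          simp only [stepA, h, if_true]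
          rw [if_neg hc]]
        rw [ih, gA]
        rw [if_pos h, if_neg hc]
        simp
    · rw [show stepA (parts, cur) x = (parts, cur ++ [x]) by simp [stepA, h]]
      rw [ih, gA, if_neg h]

lemma gA_eq_splitS (xs : List String) (cur : List String) :
    gA xs cur = match splitS xs with
      | [] => []
      | p :: ps => if (cur ++ p).isEmpty && !ps.isEmpty then ps else (cur ++ p) :: ps := by
  induction xs generalizing cur with
  | nil => simp [gA, splitS]
  | cons x xs ih =>
    cases h : splitS xs with
    | nil => exact absurd h (splitS_ne_nil xs)
    | cons p ps =>
      rw [gA]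
      by_cases hs : is_snippet_start x
      · rw [if_pos hs, ih [x]]
        simp only [splitS, h, if_pos hs]
        by_cases hc : cur.isEmpty
        · have : cur = [] := List.isEmpty_iff.mp hc
          simp [this]
        · have hne : cur ≠ [] := fun h' => hc (List.isEmpty_iff.mpr h')
          rw [if_neg hc]
          simp [hne]
      · rw [if_neg hs, ih (cur ++ [x])]
        simp only [splitS, h, if_neg hs]
        simp

-- ----- B side -----

lemma cutsFrom_cons (s : Int) (x : String) (xs : List String) :
    cutsFrom s (x :: xs) =
      (if is_snippet_start x then [s] else []) ++ cutsFrom (s + 1) xs := by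
  simp only [cutsFrom, PySem.List.enumerate_cons, List.filter_cons]
  by_cases h : is_snippet_start x <;> simp [h]

lemma cutsFrom_shift (xs : List String) (s : Int) :
    cutsFrom s xs = (cutsFrom 0 xs).map (· + s) := by
  induction xs generalizing s with
  | nil => simp [cutsFrom]
  | cons x xs ih =>
    rw [cutsFrom_cons, cutsFrom_cons, ih (s + 1), ih (0 + 1)]
    by_cases h : is_snippet_start x <;>
      simp [h, Function.comp_def] <;> intro a _ <;> ring

lemma cutsFrom_nonneg (xs : List String) : ∀ c ∈ cutsFrom 0 xs, 0 ≤ c := by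
  induction xs with
  | nil => simp [cutsFrom]
  | cons x xs ih =>
    rw [cutsFrom_cons]
    simp only [zero_add]
    rw [cutsFrom_shift xs 1]
    intro c hc
    rcases List.mem_append.mp hc with h | h
    · split at h <;> simp_all
    · rcases List.mem_map.mp h with ⟨d, hd, rfl⟩
      have := ih d hd; omega

lemma cutsFrom_pairwise (xs : List String) : (cutsFrom 0 xs).Pairwise (· < ·) := by
  induction xs with
  | nil => simp [cutsFrom]
  | cons x xs ih =>
    rw [cutsFrom_cons]
    simp only [zero_add]
    rw [cutsFrom_shift xs 1]
    have hmap : ((cutsFrom 0 xs).map (· + 1)).Pairwise (· < ·) :=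
      List.pairwise_map.mpr (ih.imp (by intro a b h; omega))
    by_cases h : is_snippet_start x
    · simp only [h, if_pos, List.singleton_append, List.pairwise_cons]
      refine ⟨?_, hmap⟩
      intro c hc
      rcases List.mem_map.mp hc with ⟨d, hd, rfl⟩
      have := cutsFrom_nonneg xs d hd; omega
    · simpa [h] using hmap

-- the sorted deduped bounds are 0 followed by the strictly positive cuts
lemma sorted_bounds (xs : List String) :
    PySem.List.sorted (PySem.Set.ofList ((0 : Int) :: cutsFrom 0 xs)) (fun x => x) false =
      0 :: (cutsFrom 0 xs).filter (fun c => 0 < c) := by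
  have hpw : ((cutsFrom 0 xs).filter (fun c => (0:Int) < c)).Pairwise (· < ·) :=
    (cutsFrom_pairwise xs).filter _
  have hcons : ((0:Int) :: (cutsFrom 0 xs).filter (fun c => 0 < c)).Pairwise (· < ·) := by
    refine List.pairwise_cons.mpr ⟨?_, hpw⟩
    intro c hc
    simpa using (List.mem_filter.mp hc).2
  apply PySem.List.sorted_eq_of_perm_of_pairwise_lt
  · apply (List.perm_ext_iff_of_nodup (hcons.imp ne_of_lt) (PySem.Set.nodup_ofList _)).mpr
    intro a
    simp only [PySem.Set.mem_ofList, List.mem_cons, List.mem_filter]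
    constructor
    · rintro (rfl | ⟨ha, _⟩)
      · exact Or.inl rfl
      · exact Or.inr ha
    · rintro (rfl | ha)
      · exact Or.inl rfl
      · by_cases h0 : a = 0
        · exact Or.inl h0
        · have := cutsFrom_nonneg xs a ha
          exact Or.inr ⟨ha, by simp; omega⟩
  · exact hcons

-- slice facts for a cons cell
lemma slice_full (xs : List String) :
    PySem.List.slice xs (some 0) (some (xs.length : Int)) = xs := by
  rw [show (some (0:Int)) = some ((0:Nat):Int) from rfl, PySem.List.slice_natCast]
  simp

lemma slice_zero_succ (x : String) (xs : List String) (b : Int) (hb : 0 ≤ b) :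
    PySem.List.slice (x :: xs) (some 0) (some (b + 1)) =
      x :: PySem.List.slice xs (some 0) (some b) := by
  rw [PySem.List.slice_toNat _ le_rfl (by omega), PySem.List.slice_toNat _ le_rfl hb]
  have h1 : (b + 1).toNat = b.toNat + 1 := by omega
  simp [h1]

lemma slice_shift (x : String) (xs : List String) (a b : Int) (ha : 0 ≤ a) (hb : 0 ≤ b) :
    PySem.List.slice (x :: xs) (some (a + 1)) (some (b + 1)) =
      PySem.List.slice xs (some a) (some b) := by
  rw [PySem.List.slice_toNat _ (by omega) (by omega), PySem.List.slice_toNat _ ha hb]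
  have h1 : (a + 1).toNat = a.toNat + 1 := by omega
  have h2 : (b + 1).toNat = b.toNat + 1 := by omega
  simp [h1, h2]

lemma pairSlices_shift (x : String) (xs : List String) :
    ∀ (bs : List Int), (∀ b ∈ bs, 0 ≤ b) →
      pairSlices (x :: xs) (bs.map (· + 1)) = pairSlices xs bs := by
  intro bs
  induction bs with
  | nil => intro _; simp [pairSlices]
  | cons b1 t ih =>
    intro hbs
    cases t with
    | nil => simp [pairSlices]
    | cons b2 t' =>
      simp only [List.map_cons, pairSlices, List.tail_cons, List.zip_cons_cons,
        List.map_cons] at ih ⊢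
      rw [slice_shift x xs b1 b2 (hbs b1 (by simp)) (hbs b2 (by simp)),
        ih (fun b hb => hbs b (List.mem_cons_of_mem _ hb))]

lemma chop0_zero (xs : List String) (cs : List Int) :
    chop0 xs (0 :: cs) = [] :: chop0 xs cs := by
  have h00 : PySem.List.slice xs (some 0) (some 0) = ([] : List String) := by
    rw [PySem.List.slice_toNat _ le_rfl le_rfl]; simp
  simp [chop0, pairSlices, h00]

lemma chop0_cons (x : String) (xs : List String) (cs : List Int) (h : ∀ c ∈ cs, 0 ≤ c) :
    chop0 (x :: xs) (cs.map (· + 1)) =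
      match chop0 xs cs with
      | [] => []
      | p :: ps => (x :: p) :: ps := by
  have hlen : ((x :: xs).length : Int) = (xs.length : Int) + 1 := by
    rw [List.length_cons]; push_cast; ring
  cases cs with
  | nil =>
    simp only [List.map_nil, chop0, List.singleton_append, pairSlices,
      List.tail_cons, List.zip_cons_cons, List.zip_nil_right, List.map_cons, List.map_nil, hlen]
    rw [slice_zero_succ x xs _ (Int.natCast_nonneg _), slice_full]
  | cons c cs' =>
    have hc : 0 ≤ c := h c (by simp)
    simp only [chop0, List.map_cons, List.cons_append, pairSlices, List.tail_cons,
      List.zip_cons_cons, List.map_cons, hlen]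
    rw [slice_zero_succ x xs c hc]
    have hshift := pairSlices_shift x xs ((c :: cs') ++ [(xs.length : Int)])
      (by intro b hb
          rcases List.mem_append.mp hb with h' | h'
          · exact h b h'
          · simp at h'; omega)
    simp only [List.map_cons, List.map_append, List.map_nil, pairSlices,
      List.cons_append, List.tail_cons] at hshift
    rw [hshift]

lemma chop0_eq_splitS (xs : List String) : chop0 xs (cutsFrom 0 xs) = splitS xs := by
  induction xs with
  | nil =>
    simp only [cutsFrom, PySem.List.enumerate_nil, List.filter_nil, List.map_nil, splitS,
      chop0, pairSlices]
    simp [PySem.List.slice_toNat _ le_rfl le_rfl]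
  | cons x xs ih =>
    rw [cutsFrom_cons]
    simp only [zero_add]
    rw [cutsFrom_shift xs 1]
    cases hs : splitS xs with
    | nil => exact absurd hs (splitS_ne_nil xs)
    | cons p ps =>
      by_cases h : is_snippet_start x
      · simp only [h, if_pos, List.singleton_append]
        rw [chop0_zero, chop0_cons x xs _ (cutsFrom_nonneg xs), ih, hs]
        simp [splitS, hs, h]
      · simp only [h, Bool.false_eq_true, if_neg, List.nil_append, not_false_iff]
        rw [chop0_cons x xs _ (cutsFrom_nonneg xs), ih, hs]
        simp [splitS, hs, h]

-- B's port is chop0 at the strictly positive cuts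
lemma alt_eq_chop0 (xs : List String) :
    split_md_around_snippets_py_alt xs = chop0 xs ((cutsFrom 0 xs).filter (fun c => 0 < c)) := by
  simp only [split_md_around_snippets_py_alt]
  rw [show ((PySem.List.enumerate xs).filter (fun p => is_snippet_start p.2)).map (fun p => p.1) =
        cutsFrom 0 xs from rfl]
  rw [sorted_bounds]
  rfl

-- B with an empty head degenerates exactly as A's flush rule demands
lemma alt_eq_dropHead (xs : List String) :
    split_md_around_snippets_py_alt xs =
      match splitS xs with
      | [] => []
      | p :: ps => if p.isEmpty && !ps.isEmpty then ps else p :: ps := by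
  rw [alt_eq_chop0]
  cases xs with
  | nil =>
    simp only [cutsFrom, PySem.List.enumerate_nil, List.filter_nil, List.map_nil, splitS,
      chop0, pairSlices]
    simp [PySem.List.slice_toNat _ le_rfl le_rfl]
  | cons x xs =>
    rw [cutsFrom_cons]
    simp only [zero_add]
    rw [cutsFrom_shift xs 1]
    have hposmap : (((cutsFrom 0 xs).map (· + 1)).filter (fun c => 0 < c)) =
        (cutsFrom 0 xs).map (· + 1) := by
      apply List.filter_eq_self.mpr
      intro c hc
      rcases List.mem_map.mp hc with ⟨d, hd, rfl⟩
      have := cutsFrom_nonneg xs d hd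
      simp; omega
    cases hs : splitS xs with
    | nil => exact absurd hs (splitS_ne_nil xs)
    | cons p ps =>
      by_cases h : is_snippet_start x
      · simp only [h, if_pos, List.singleton_append, List.filter_cons]
        rw [show (decide ((0:Int) < 0)) = false by decide]
        simp only [Bool.false_eq_true, if_neg, not_false_iff]
        rw [hposmap, chop0_cons x xs _ (cutsFrom_nonneg xs), chop0_eq_splitS, hs]
        simp [splitS, hs, h]
      · simp only [h, Bool.false_eq_true, if_neg, List.nil_append, not_false_iff]
        rw [hposmap, chop0_cons x xs _ (cutsFrom_nonneg xs), chop0_eq_splitS, hs]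
        simp [splitS, hs, h]

-- ===== VERDICT (by name: the statement is the Claim_ definition above) =====
theorem split_md_around_snippets_py_spec : Claim_equal_split_md_around_snippets_py := by
  intro xs _
  unfold Spec_split_md_around_snippets_py split_md_around_snippets_py
  have hA := foldlA_eq_gA xs [] []
  simp only [List.nil_append] at hA
  rw [hA, gA_eq_splitS, alt_eq_dropHead]
  cases hs : splitS xs with
  | nil => rfl
  | cons p ps => simp
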